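-- pv_equiv track=rewrite | github.com/child1shbebate/number_sorter | list_sorted.py | alternate_low_high
-- ===== SOURCE A (Python) =====
-- def alternate_low_high(numbers):
--     sorted_numbers = sorted(numbers)
--     result = []
--     while sorted_numbers:
--         if sorted_numbers:
--             result.append(sorted_numbers.pop(0))  # Add the lowest number
--         if sorted_numbers:
--             result.append(sorted_numbers.pop(-1))  # Add the highest number
--     return result
-- ===== SOURCE B (Python) =====
-- def alternate_low_high(numbers):
--     s = sorted(numbers)
--     h = (len(s) + 1) // 2
--     low, high = s[:h], s[h:][::-1]
--     out = []
--     for a, b in zip(low, high):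
--         out.append(a)
--         out.append(b)
--     if len(high) < len(low):
--         out.append(low[-1])
--     return out
-- ===== Notes on version B (the rewrite author's own statement) =====
-- stated objective: faster
-- what changed: Replaced the repeated pop(0)/pop(-1) loop (each pop(0) shifts the whole list) by one sort, a split into the low half and the reversed high half, and a single zip-interleave pass.
import Mathlib
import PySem

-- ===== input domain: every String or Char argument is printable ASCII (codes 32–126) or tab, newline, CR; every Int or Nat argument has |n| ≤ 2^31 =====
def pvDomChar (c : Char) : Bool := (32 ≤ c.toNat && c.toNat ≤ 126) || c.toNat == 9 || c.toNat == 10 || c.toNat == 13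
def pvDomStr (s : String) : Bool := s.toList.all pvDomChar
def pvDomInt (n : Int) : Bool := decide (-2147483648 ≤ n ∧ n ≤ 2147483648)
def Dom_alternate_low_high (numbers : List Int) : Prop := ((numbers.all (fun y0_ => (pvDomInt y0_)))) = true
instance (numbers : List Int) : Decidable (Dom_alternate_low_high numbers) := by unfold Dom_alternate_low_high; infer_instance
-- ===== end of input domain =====

-- B replaces A's quadratic pop(0)/pop(-1) loop by one split of the sorted list and a single zip-interleave pass (asymptotically faster).


-- ===== PORT A =====
-- the while loop: pop(0) then (if nonempty) pop(-1), appending both to result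
def aLoop : List Int → List Int
  | [] => []
  | x :: xs =>
    if h : xs = [] then [x]
    else x :: xs.getLast h :: aLoop xs.dropLast
termination_by l => l.length
decreasing_by simp [List.length_dropLast]

def alternate_low_high (numbers : List Int) : List Int :=
  aLoop (PySem.List.sorted numbers (fun x => x) false)

-- ===== PORT B =====
def alternate_low_high_alt (numbers : List Int) : List Int :=
  let s := PySem.List.sorted numbers (fun x => x) false
  let h := (s.length + 1) / 2
  let low := s.take h
  let high := (s.drop h).reverse
  ((low.zip high).flatMap (fun p => [p.1, p.2])) ++
    (if high.length < low.length then [low.getLastD 0] else [])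
    -- low[-1]: under the guard low is nonempty, so getLastD never uses the default

-- ===== PRECONDITION & SPEC =====
def Spec_alternate_low_high (numbers : List Int) (out : List Int) : Prop := out = alternate_low_high_alt numbers
instance (numbers : List Int) (out : List Int) : Decidable (Spec_alternate_low_high numbers out) := by unfold Spec_alternate_low_high; infer_instance

-- ===== CLAIM (what is proved, stated in full; the proofs are below) =====
def Claim_equal_alternate_low_high : Prop := ∀ (numbers : List Int), Dom_alternate_low_high numbers → Spec_alternate_low_high numbers (alternate_low_high numbers)

-- ===== LEMMAS AND PROOFS =====

-- B's builder, abstracted over the (sorted) list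
def bBuild (s : List Int) : List Int :=
  let h := (s.length + 1) / 2
  let low := s.take h
  let high := (s.drop h).reverse
  ((low.zip high).flatMap (fun p => [p.1, p.2])) ++
    (if high.length < low.length then [low.getLastD 0] else [])

theorem aLoop_eq_bBuild (s : List Int) : aLoop s = bBuild s := by
  induction s using aLoop.induct with
  | case1 => simp [aLoop, bBuild]
  | case2 x => simp [aLoop, bBuild]
  | case3 x xs hne ih =>
    rw [aLoop]
    simp only [dif_neg hne]
    obtain ⟨m, y, hm, hy⟩ : ∃ m y, xs.dropLast = m ∧ xs.getLast hne = y := ⟨_, _, rfl, rfl⟩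
    have hxs : xs = m ++ [y] := by rw [← hm, ← hy]; exact (List.dropLast_append_getLast hne).symm
    rw [hm] at ih
    rw [hy, hm, hxs]
    unfold bBuild
    simp only [List.length_cons, List.length_append, List.length_nil, zero_add]
    set n := m.length with hn
    have h1 : (n + 1 + 1 + 1) / 2 = (n + 1) / 2 + 1 := by omega
    have h2 : (n + 1) / 2 ≤ n := by omega
    rw [h1]
    simp only [List.take_succ_cons, List.drop_succ_cons]
    rw [List.take_append_of_le_length h2, List.drop_append_of_le_length h2]
    simp only [List.reverse_append, List.reverse_singleton, List.singleton_append,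
      List.zip_cons_cons, List.flatMap_cons, List.length_cons, List.length_reverse,
      List.length_take, List.length_drop, List.length_cons]
    rw [ih]
    unfold bBuild
    simp only [← hn, List.length_reverse, List.length_take, List.length_drop]
    have hmin : min ((n+1)/2) n = (n+1)/2 := by omega
    rw [hmin]
    by_cases hc : n - (n + 1) / 2 < (n + 1) / 2
    · have hc' : n - (n+1)/2 + 1 < (n+1)/2 + 1 := by omega
      rw [if_pos hc, if_pos hc']
      have hhm : 1 ≤ (n+1)/2 := by omega
      have hne' : m.take ((n+1)/2) ≠ [] := by
        intro h; have := congrArg List.length h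
        rw [List.length_take] at this
        simp only [List.length_nil] at this
        omega
      have : (x :: m.take ((n+1)/2)).getLastD 0 = (m.take ((n+1)/2)).getLastD 0 := by
        rw [List.getLastD_cons]
        cases h : m.take ((n+1)/2) with
        | nil => exact absurd h hne'
        | cons a t =>
          rcases hq : (a :: t).getLast? with _ | v
          · simp [List.getLast?_eq_none_iff] at hq
          · simp [List.getLastD]
      rw [this]
      simp
    · have hc' : ¬ (n - (n+1)/2 + 1 < (n+1)/2 + 1) := by omega
      rw [if_neg hc, if_neg hc']
      simp

-- ===== VERDICT (by name: the statement is the Claim_ definition above) =====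
theorem alternate_low_high_spec : Claim_equal_alternate_low_high := by
  intro numbers _
  unfold Spec_alternate_low_high alternate_low_high alternate_low_high_alt
  exact aLoop_eq_bBuild _
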